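-- pv_equiv track=rewrite | github.com/Abdelrhman-Hosny/regex-dfa-conversion | my_regex/utils.py | get_split_indices_for_or_operation
-- ===== SOURCE A (Python) =====
-- def match_2_chars(regex, char1, char2):
--
--     matches = []
--     my_stack = []
--
--     for i, c in enumerate(regex):
--         if c == char1 and (i == 0 or regex[i - 1] != "\\"):
--             my_stack.append(i)
--         elif c == char2 and (i == 0 or regex[i - 1] != "\\"):
--             if len(my_stack) == 0:
--                 raise Exception(f"Unmatched {char2}")
--             matches.append((my_stack.pop(), i))
--     if len(my_stack) > 0:
--         raise Exception(f"Unmatched {char1}")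
--     return matches
--
-- def get_matched_parenthesis(regex):
--     """
--     Returns a list of tuples, each tuple has the start and end for each index
--     """
--
--     return match_2_chars(regex, "(", ")")
--
-- def get_matched_square_brackets(regex):
--     """
--     Returns a list of tuples, each tuple has the start and end for each index
--     """
--     return match_2_chars(regex, "[", "]")
--
-- def validate_sorted_brackets(brackets):
--     """
--     Input is a sorted list of tuples containing bracket indices.
--     Makes sure that brackets don't intersect
--     e.g.    ([)] not allowed
--             [()] allowed
--     """
--     intersecting_brackets = sum(
--         [
--             True if s1 < s2 < e1 and e1 < e2 else False
--             for s1, e1 in brackets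
--             for s2, e2 in brackets
--         ]
--     )
--
--     if intersecting_brackets != 0:
--         raise Exception("Brackets intersect")
--
-- def get_containing_brackets(brackets):
--     """
--     Returns a list, each element containts a tuple and a list
--     The tuple contains the start and end index of the outermost bracket
--     The list contains tuples of the indices of the innermost brackets
--
--     inputs:
--         brackets: a SORTED list of tuples including brackets
--     """
--     i = 0
--     ret = []
--
--     while i < len(brackets):
--         s1, e1 = brackets[i]
--         i += 1
--         local_containing_brackets = []
--         while i < len(brackets):
--             s2, e2 = brackets[i]
--             if s2 > s1 and e1 > e2:
--                 local_containing_brackets.append((s2, e2))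
--                 i += 1
--             else:
--                 break
--         ret.append(((s1, e1), local_containing_brackets))
--     return ret
--
-- def get_brackets(regex):
--
--     brackets = get_matched_square_brackets(regex) + get_matched_parenthesis(regex)
--
--     brackets = sorted(brackets, key=lambda x: x[0])
--     validate_sorted_brackets(brackets)
--
--     return (x for x in get_containing_brackets(brackets))
--
-- def get_split_indices_for_or_operation(regex):
--
--     brackets = list(get_brackets(regex))
--
--     or_location = [i for i, c in enumerate(regex) if c == "|"]
--
--     final_or_locations = []
--     for or_index in or_location:
--         temp = True
--         for outer, _ in brackets:
--             if outer[0] < or_index < outer[1]: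
--                 temp = False
--                 break
--         if temp:
--             final_or_locations.append(or_index)
--
--     return final_or_locations
-- ===== SOURCE B (Python) =====
-- def get_split_indices_for_or_operation(regex):
--     pstack, sstack = [], []
--     pairs = []
--     pipes = []
--     prev = None
--     for i, ch in enumerate(regex):
--         esc = prev == "\\"
--         if ch == "(" and not esc:
--             pstack.append(i)
--         elif ch == ")" and not esc:
--             if pstack:
--                 pairs.append((pstack.pop(), i))
--         elif ch == "[" and not esc:
--             sstack.append(i)
--         elif ch == "]" and not esc:
--             if sstack:
--                 pairs.append((sstack.pop(), i))
--         elif ch == "|":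
--             pipes.append(i)
--         prev = ch
--     return [i for i in pipes if not any(s < i < e for s, e in pairs)]
-- ===== Notes on version B (the rewrite author's own statement) =====
-- stated objective: faster
-- what changed: A runs two independent stack matchers, sorts the pairs, does an O(b^2) pairwise intersection check, groups pairs into outermost brackets, and tests each pipe against the outer brackets; B does one combined pass with two stacks collecting all matched pairs and pipe positions, then filters pipes by direct containment in any pair (sort, intersection check and outer-bracket grouping are dropped: they do not affect the result on inputs where A returns).
-- outside the precondition, e.g. on get_split_indices_for_or_operation('('): A raises Exception, B returns []; on get_split_indices_for_or_operation(')'): A raises Exception, B returns []; on get_split_indices_for_or_operation('['): A raises Exception, B returns []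
import Mathlib
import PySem

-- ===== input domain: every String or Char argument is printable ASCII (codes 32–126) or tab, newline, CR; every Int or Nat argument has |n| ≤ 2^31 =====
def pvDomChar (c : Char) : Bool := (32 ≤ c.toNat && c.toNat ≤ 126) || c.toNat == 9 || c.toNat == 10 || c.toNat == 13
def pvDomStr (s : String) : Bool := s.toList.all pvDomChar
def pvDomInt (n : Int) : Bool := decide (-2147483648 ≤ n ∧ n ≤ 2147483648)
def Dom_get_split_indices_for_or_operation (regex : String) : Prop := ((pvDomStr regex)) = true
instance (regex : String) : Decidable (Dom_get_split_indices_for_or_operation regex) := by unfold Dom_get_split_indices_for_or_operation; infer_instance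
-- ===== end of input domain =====

-- B replaces A's six phases (two independent bracket matchers, sort, O(b²) intersection check, outer-bracket
-- grouping, per-pipe scan over outer brackets) by ONE combined pass with two stacks collecting all matched
-- pairs and pipe positions, then a direct containment filter; equal to A wherever A returns (Pre_ excludes
-- exactly the inputs on which A raises: unmatched or intersecting brackets).

-- ===== PORT A =====
-- A's match_2_chars: `none` is exactly where Python raises "Unmatched …"
def m2go (c1 c2 : Char) : List Char → Option Char → Nat → List Nat → List (Nat × Nat) → Option (List (Nat × Nat))
  | [], _, _, stack, ms => if stack.isEmpty then some ms else none
  | ch :: rest, prev, i, stack, ms =>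
    if ch = c1 ∧ prev ≠ some '\\' then
      m2go c1 c2 rest (some ch) (i+1) (i :: stack) ms
    else if ch = c2 ∧ prev ≠ some '\\' then
      match stack with
      | [] => none
      | a :: st => m2go c1 c2 rest (some ch) (i+1) st (ms ++ [(a, i)])
    else m2go c1 c2 rest (some ch) (i+1) stack ms

-- A's validate_sorted_brackets: the summed comprehension (nonzero = Python raises "Brackets intersect")
def crossSum (bs : List (Nat × Nat)) : Int :=
  (bs.flatMap (fun p1 => bs.map (fun p2 =>
    if p1.1 < p2.1 ∧ p2.1 < p1.2 ∧ p1.2 < p2.2 then (1 : Int) else 0))).sum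

-- A's inner while loop of get_containing_brackets
def takeInners (p : Nat × Nat) : List (Nat × Nat) → (List (Nat × Nat) × List (Nat × Nat))
  | [] => ([], [])
  | q :: rest =>
    if q.1 > p.1 ∧ p.2 > q.2 then
      ((q :: (takeInners p rest).1), (takeInners p rest).2)
    else ([], q :: rest)

theorem takeInners_len (p : Nat × Nat) (l : List (Nat × Nat)) :
    (takeInners p l).2.length ≤ l.length := by
  induction l with
  | nil => simp [takeInners]
  | cons q rest ih =>
    simp only [takeInners]
    split
    · exact Nat.le_succ_of_le ih
    · simp

-- A's outer while loop of get_containing_brackets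
def grouping : List (Nat × Nat) → List ((Nat × Nat) × List (Nat × Nat))
  | [] => []
  | p :: rest => (p, (takeInners p rest).1) :: grouping (takeInners p rest).2
termination_by l => l.length
decreasing_by exact Nat.lt_succ_of_le (takeInners_len p rest)

-- A's or_location comprehension: positions of '|'
def pipesOf : List Char → Nat → List Nat
  | [], _ => []
  | ch :: rest, i => if ch = '|' then i :: pipesOf rest (i+1) else pipesOf rest (i+1)

-- A's inner for-loop over brackets with break (temp flag)
def outerHit : List ((Nat × Nat) × List (Nat × Nat)) → Nat → Bool
  | [], _ => false
  | (o, _) :: rest, i => if o.1 < i ∧ i < o.2 then true else outerHit rest i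

def get_split_indices_for_or_operation (regex : String) : List Int :=
  let s := regex.toList
  match m2go '[' ']' s none 0 [] [], m2go '(' ')' s none 0 [] [] with
  | some sq, some pa =>
    let brackets := PySem.List.sorted (sq ++ pa) (fun x => x.1)
    if crossSum brackets ≠ 0 then []  -- Python raises "Brackets intersect"; excluded by Pre_
    else
      ((pipesOf s 0).filter (fun i => ! outerHit (grouping brackets) i)).map (fun n => (n : Int))
  | _, _ => []  -- Python raises "Unmatched …"; excluded by Pre_

-- ===== PORT B =====
-- one combined pass: two stacks, all matched pairs, pipe positions
def bscan : List Char → Option Char → Nat → List Nat → List Nat → List (Nat × Nat) → List Nat →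
    (List (Nat × Nat) × List Nat)
  | [], _, _, _, _, pairs, pipes => (pairs, pipes)
  | ch :: rest, prev, i, pstack, sstack, pairs, pipes =>
    if ch = '(' ∧ ¬ (prev = some '\\') then bscan rest (some ch) (i+1) (i :: pstack) sstack pairs pipes
    else if ch = ')' ∧ ¬ (prev = some '\\') then
      match pstack with
      | [] => bscan rest (some ch) (i+1) [] sstack pairs pipes
      | a :: st => bscan rest (some ch) (i+1) st sstack (pairs ++ [(a, i)]) pipes
    else if ch = '[' ∧ ¬ (prev = some '\\') then bscan rest (some ch) (i+1) pstack (i :: sstack) pairs pipes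
    else if ch = ']' ∧ ¬ (prev = some '\\') then
      match sstack with
      | [] => bscan rest (some ch) (i+1) pstack [] pairs pipes
      | a :: st => bscan rest (some ch) (i+1) pstack st (pairs ++ [(a, i)]) pipes
    else if ch = '|' then bscan rest (some ch) (i+1) pstack sstack pairs (pipes ++ [i])
    else bscan rest (some ch) (i+1) pstack sstack pairs pipes

def get_split_indices_for_or_operation_alt (regex : String) : List Int :=
  let r := bscan regex.toList none 0 [] [] [] []
  (r.2.filter (fun i => ! r.1.any (fun p => decide (p.1 < i ∧ i < p.2)))).map (fun n => (n : Int))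

-- ===== PRECONDITION & SPEC =====
-- helpers for Pre_ (independent of both ports): prefix counts of unescaped occurrences
abbrev puOcc (s : List Char) (c : Char) (i : Nat) : Prop :=
  i < s.length ∧ s.getD i ' ' = c ∧ (i = 0 ∨ s.getD (i - 1) ' ' ≠ '\\')

def cntU (s : List Char) (c : Char) (m : Nat) : Nat :=
  (List.range m).countP (fun i => decide (puOcc s c i))

def depU (s : List Char) (o c : Char) (m : Nat) : Int := (cntU s o m : Int) - (cntU s c m : Int)

-- both bracket kinds matched: every prefix has ≥ as many unescaped openers as closers, totals equal
abbrev BalU (s : List Char) (o c : Char) : Prop :=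
  (∀ m, m ≤ s.length → cntU s c m ≤ cntU s o m) ∧ cntU s o s.length = cntU s c s.length

abbrev PairU (s : List Char) (o c : Char) (a b : Nat) : Prop :=
  puOcc s o a ∧ puOcc s c b ∧ a < b ∧
  (∀ m, m ≤ b → a < m → depU s o c (a + 1) ≤ depU s o c m) ∧
  depU s o c (b + 1) = depU s o c (a + 1) - 1

-- a parenthesis pair crossing a square-bracket pair (bounded search over index quadruples)
def crossWitness (s : List Char) : Bool :=
  (List.range s.length).any fun i =>
    (List.range s.length).any fun j =>
      (List.range s.length).any fun k =>
        (List.range s.length).any fun l =>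
          decide (i < j) && decide (j < k) && decide (k < l) &&
          ((decide (PairU s '(' ')' i k) && decide (PairU s '[' ']' j l)) ||
           (decide (PairU s '[' ']' i k) && decide (PairU s '(' ')' j l)))

-- Pre_ = exactly the inputs on which Python A returns (raises excluded: an unmatched '(' ')' '[' ']'
-- or a parenthesis pair crossing a square-bracket pair)
def Pre_get_split_indices_for_or_operation (regex : String) : Prop :=
  BalU regex.toList '[' ']' ∧ BalU regex.toList '(' ')' ∧ crossWitness regex.toList = false

instance (regex : String) : Decidable (Pre_get_split_indices_for_or_operation regex) := by
  unfold Pre_get_split_indices_for_or_operation; infer_instance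

def pvWitness_get_split_indices_for_or_operation : String := "(a|b)|[c|]"

def Spec_get_split_indices_for_or_operation (regex : String) (out : List Int) : Prop := out = get_split_indices_for_or_operation_alt regex
instance (regex : String) (out : List Int) : Decidable (Spec_get_split_indices_for_or_operation regex out) := by unfold Spec_get_split_indices_for_or_operation; infer_instance

-- ===== CLAIM (what is proved, stated in full; the proofs are below) =====
def Claim_equal_get_split_indices_for_or_operation : Prop := ∀ (regex : String), Dom_get_split_indices_for_or_operation regex → Pre_get_split_indices_for_or_operation regex → Spec_get_split_indices_for_or_operation regex (get_split_indices_for_or_operation regex)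

-- ===== LEMMAS AND PROOFS =====

def prevOf (s : List Char) (i : Nat) : Option Char :=
  if i = 0 then none else some (s.getD (i - 1) ' ')

theorem cntU_zero (s : List Char) (c : Char) : cntU s c 0 = 0 := by simp [cntU]

theorem cntU_succ (s : List Char) (c : Char) (m : Nat) :
    cntU s c (m + 1) = cntU s c m + (if puOcc s c m then 1 else 0) := by
  unfold cntU
  rw [List.range_succ, List.countP_append, List.countP_cons, List.countP_nil]
  by_cases h : puOcc s c m
  · rw [if_pos h, if_pos (decide_eq_true h)]
  · rw [if_neg h, if_neg (by simpa using h)]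

theorem puOcc_iff_prevOf (s : List Char) (c : Char) (i : Nat) (h : i < s.length) :
    puOcc s c i ↔ (s.getD i ' ' = c ∧ prevOf s i ≠ some '\\') := by
  unfold puOcc prevOf
  by_cases h0 : i = 0
  · subst h0
    simp [h]
  · rw [if_neg h0]
    constructor
    · rintro ⟨-, hc, hp⟩
      refine ⟨hc, ?_⟩
      rcases hp with h' | hne
      · exact absurd h' h0
      · simpa using hne
    · rintro ⟨hc, hp⟩
      exact ⟨h, hc, Or.inr (by simpa using hp)⟩

theorem depU_succ (s : List Char) (o c : Char) (m : Nat) :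
    depU s o c (m + 1) = depU s o c m
      + (if puOcc s o m then 1 else 0) - (if puOcc s c m then 1 else 0) := by
  unfold depU
  rw [cntU_succ, cntU_succ]
  push_cast
  split <;> split <;> ring

def StkOk (s : List Char) (o c : Char) (i : Nat) : List Nat → Nat → Prop
  | [], d => d = 0
  | a :: st, d =>
    puOcc s o a ∧ a < i ∧ depU s o c (a + 1) = (d : Int) ∧
    (∀ m, m ≤ i → a < m → (d : Int) ≤ depU s o c m) ∧ 0 < d ∧ StkOk s o c i st (d - 1)

theorem StkOk_extend (s : List Char) (o c : Char) (i : Nat) :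
    ∀ (st : List Nat) (d : Nat), StkOk s o c i st d → (d : Int) ≤ depU s o c (i + 1) →
      StkOk s o c (i + 1) st d := by
  intro st
  induction st with
  | nil => intro d h _; exact h
  | cons a t ih =>
    rintro d ⟨ho, hai, hda, hall, hdpos, htail⟩ hde
    refine ⟨ho, Nat.lt_succ_of_lt hai, hda, ?_, hdpos, ih _ htail ?_⟩
    · intro m hm ham
      rcases Nat.lt_succ_iff_lt_or_eq.mp (Nat.lt_succ_of_le hm) with h' | h'
      · exact hall m (by omega) ham
      · subst h'; exact hde
    · have : ((d - 1 : Nat) : Int) ≤ (d : Int) := by omega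
      omega

theorem depU_nonneg_of_bal (s : List Char) (o c : Char) (h : BalU s o c) (m : Nat)
    (hm : m ≤ s.length) : 0 ≤ depU s o c m := by
  have := h.1 m hm
  unfold depU; omega

theorem scan_ok (s : List Char) (o c : Char) (hoc : o ≠ c) (hbal : BalU s o c) :
    ∀ (rest : List Char) (i : Nat) (stack : List Nat) (ms : List (Nat × Nat)) (d : Nat),
      s.drop i = rest → i + rest.length = s.length →
      StkOk s o c i stack d → (d : Int) = depU s o c i →
      (∀ p ∈ ms, PairU s o c p.1 p.2) →
      ∃ out, m2go o c rest (prevOf s i) i stack ms = some out ∧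
        ∀ p ∈ out, PairU s o c p.1 p.2 := by
  intro rest
  induction rest with
  | nil =>
    intro i stack ms d hdrop hlen hstk hd hms
    have hi : i = s.length := by simpa using hlen
    have hd0 : d = 0 := by
      have h2 := hbal.2
      have : depU s o c i = 0 := by subst hi; unfold depU; omega
      omega
    subst hd0
    have hstk0 : stack = [] := by
      cases stack with
      | nil => rfl
      | cons a t => rcases hstk with ⟨-, -, -, -, hpos, -⟩; omega
    subst hstk0
    exact ⟨ms, by simp [m2go], hms⟩
  | cons ch rest' ih =>
    intro i stack ms d hdrop hlen hstk hd hms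
    have hilt : i < s.length := by simp at hlen; omega
    have hgd : s.getD i ' ' = ch := by
      have h : (s.drop i)[0]? = s[i + 0]? := List.getElem?_drop
      rw [hdrop] at h
      simp at h
      simp [List.getD, ← h]
    have hdrop' : s.drop (i + 1) = rest' := by
      have h : List.drop 1 (List.drop i s) = List.drop (i + 1) s := List.drop_drop
      rw [hdrop] at h; simpa using h.symm
    have hlen' : (i + 1) + rest'.length = s.length := by simp at hlen ⊢; omega
    have hprev' : (some ch) = prevOf s (i + 1) := by
      unfold prevOf
      rw [if_neg (by omega : ¬ i + 1 = 0)]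
      simp only [Nat.add_sub_cancel]
      rw [hgd]
    have hde : depU s o c (i + 1) = depU s o c i
        + (if puOcc s o i then 1 else 0) - (if puOcc s c i then 1 else 0) :=
      depU_succ s o c i
    simp only [m2go]
    by_cases h1 : ch = o ∧ prevOf s i ≠ some '\\'
    · -- push
      have hocc : puOcc s o i := (puOcc_iff_prevOf s o i hilt).mpr ⟨by rw [hgd, h1.1], h1.2⟩
      have hnoc : ¬ puOcc s c i := by
        intro hc; exact hoc (by rw [← hocc.2.1, hc.2.1])
      have hdep1 : depU s o c (i + 1) = (d : Int) + 1 := by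
        rw [hde, if_pos hocc, if_neg hnoc]; omega
      rw [if_pos h1]
      have hstk' : StkOk s o c (i + 1) (i :: stack) (d + 1) := by
        refine ⟨hocc, Nat.lt_succ_self i, by push_cast; omega, ?_, Nat.succ_pos d, ?_⟩
        · intro m hm ham
          have : m = i + 1 := by omega
          subst this; push_cast; omega
        · simpa using StkOk_extend s o c i stack d hstk (by omega)
      rw [hprev']
      exact ih (i + 1) (i :: stack) ms (d + 1) hdrop' hlen' hstk' (by push_cast; omega) hms
    · rw [if_neg h1]
      by_cases h2 : ch = c ∧ prevOf s i ≠ some '\\'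
      · -- pop
        have hocc : puOcc s c i := (puOcc_iff_prevOf s c i hilt).mpr ⟨by rw [hgd, h2.1], h2.2⟩
        have hno : ¬ puOcc s o i := by
          intro hc; exact hoc (by rw [← hc.2.1, hocc.2.1])
        have hdep1 : depU s o c (i + 1) = (d : Int) - 1 := by
          rw [hde, if_neg hno, if_pos hocc]; omega
        have hnn : 0 ≤ depU s o c (i + 1) := depU_nonneg_of_bal s o c hbal (i + 1) (by omega)
        have hdpos : 0 < d := by omega
        cases stack with
        | nil => exact absurd (by simpa using hstk : d = 0) (by omega)
        | cons a st =>
          rw [if_pos h2]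
          rcases hstk with ⟨hoa, hai, hda, hall, -, htail⟩
          have hpair : PairU s o c a i := by
            refine ⟨hoa, hocc, hai, ?_, by omega⟩
            intro m hm ham
            rw [hda]; exact hall m hm ham
          have htail' : StkOk s o c (i + 1) st (d - 1) :=
            StkOk_extend s o c i st (d - 1) htail (by push_cast; omega)
          have hms' : ∀ p ∈ ms ++ [(a, i)], PairU s o c p.1 p.2 := by
            intro p hp
            rcases List.mem_append.mp hp with h | h
            · exact hms p h
            · simp at h; subst h; exact hpair
          rw [hprev']
          exact ih (i + 1) st (ms ++ [(a, i)]) (d - 1) hdrop' hlen' htail' (by push_cast; omega) hms'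
      · -- no-op
        rw [if_neg h2]
        have hno : ¬ puOcc s o i := by
          intro hc
          rcases (puOcc_iff_prevOf s o i hilt).mp hc with ⟨hg, hp⟩
          exact h1 ⟨by rw [← hgd, hg], hp⟩
        have hnc : ¬ puOcc s c i := by
          intro hc
          rcases (puOcc_iff_prevOf s c i hilt).mp hc with ⟨hg, hp⟩
          exact h2 ⟨by rw [← hgd, hg], hp⟩
        have hdep1 : depU s o c (i + 1) = (d : Int) := by
          rw [hde, if_neg hno, if_neg hnc]; omega
        have hstk' := StkOk_extend s o c i stack d hstk (by omega)
        rw [hprev']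
        exact ih (i + 1) stack ms d hdrop' hlen' hstk' (by omega) hms

theorem pairU_no_cross (s : List Char) (o c : Char) (a b a' b' : Nat)
    (h1 : PairU s o c a b) (h2 : PairU s o c a' b')
    (hx : a < a' ∧ a' < b ∧ b < b') : False := by
  obtain ⟨-, -, -, hall1, hend1⟩ := h1
  obtain ⟨-, -, -, hall2, hend2⟩ := h2
  have e1 : depU s o c (a + 1) ≤ depU s o c (a' + 1) := hall1 (a' + 1) (by omega) (by omega)
  have e2 : depU s o c (a' + 1) ≤ depU s o c (b + 1) := hall2 (b + 1) (by omega) (by omega)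
  omega

theorem takeInners_split (p : Nat × Nat) (l : List (Nat × Nat)) :
    (takeInners p l).1 ++ (takeInners p l).2 = l ∧
      ∀ q ∈ (takeInners p l).1, p.1 < q.1 ∧ q.2 < p.2 := by
  induction l with
  | nil => simp [takeInners]
  | cons q rest ih =>
    simp only [takeInners]
    split
    · rename_i hq
      refine ⟨by simp [ih.1], ?_⟩
      intro r hr
      rcases List.mem_cons.mp hr with h | h
      · subst h; exact ⟨hq.1, hq.2⟩
      · exact ih.2 r h
    · simp

theorem grouping_contains (bs : List (Nat × Nat)) (i : Nat) :
    outerHit (grouping bs) i = true ↔ ∃ p ∈ bs, p.1 < i ∧ i < p.2 := by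
  induction bs using grouping.induct with
  | case1 => simp [grouping, outerHit]
  | case2 p rest ih =>
    obtain ⟨hsplit, hins⟩ := takeInners_split p rest
    simp only [grouping, outerHit]
    split
    · rename_i hp
      simp only [true_iff]
      exact ⟨p, List.mem_cons_self, hp⟩
    · rename_i hp
      rw [ih]
      constructor
      · rintro ⟨q, hq, hqi⟩
        refine ⟨q, ?_, hqi⟩
        right
        rw [← hsplit]
        exact List.mem_append.mpr (Or.inr hq)
      · rintro ⟨q, hq, hqi⟩
        rcases List.mem_cons.mp hq with h | h
        · subst h; exact absurd hqi hp
        · rw [← hsplit] at h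
          rcases List.mem_append.mp h with h | h
          · have := hins q h
            exact absurd ⟨by omega, by omega⟩ hp
          · exact ⟨q, h, hqi⟩

theorem m2go_acc (c1 c2 : Char) :
    ∀ (rest : List Char) (prev : Option Char) (i : Nat) (st : List Nat) (ms : List (Nat × Nat)),
      m2go c1 c2 rest prev i st ms = (m2go c1 c2 rest prev i st []).map (ms ++ ·) := by
  intro rest
  induction rest with
  | nil =>
    intro prev i st ms
    simp only [m2go]
    split <;> simp
  | cons ch rest' ih =>
    intro prev i st ms
    simp only [m2go]
    split
    · exact ih _ _ _ _
    · split
      · cases st with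
        | nil => simp
        | cons a t =>
          dsimp only
          rw [ih _ _ _ (ms ++ [(a, i)]), ih _ _ _ ([] ++ [(a, i)])]
          simp [Option.map_map, Function.comp_def]
      · exact ih _ _ _ _

theorem bscan_acc :
    ∀ (rest : List Char) (prev : Option Char) (i : Nat) (sp ss : List Nat)
      (pairs : List (Nat × Nat)) (pipes : List Nat),
      bscan rest prev i sp ss pairs pipes =
        (pairs ++ (bscan rest prev i sp ss [] []).1, pipes ++ (bscan rest prev i sp ss [] []).2) := by
  intro rest
  induction rest with
  | nil => intro prev i sp ss pairs pipes; simp [bscan]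
  | cons ch rest' ih =>
    intro prev i sp ss pairs pipes
    simp only [bscan]
    split
    · exact ih _ _ _ _ _ _
    · split
      · cases sp with
        | nil => exact ih _ _ _ _ _ _
        | cons a t =>
          dsimp only
          rw [ih _ _ _ _ (pairs ++ [(a, i)]) pipes, ih _ _ _ _ ([] ++ [(a, i)]) []]
          simp
      · split
        · exact ih _ _ _ _ _ _
        · split
          · cases ss with
            | nil => exact ih _ _ _ _ _ _
            | cons a t =>
              dsimp only
              rw [ih _ _ _ _ (pairs ++ [(a, i)]) pipes, ih _ _ _ _ ([] ++ [(a, i)]) []]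
              simp
          · split
            · rw [ih _ _ _ _ pairs (pipes ++ [i]), ih _ _ _ _ [] ([] ++ [i])]
              simp
            · exact ih _ _ _ _ _ _

theorem bscan_corr :
    ∀ (rest : List Char) (prev : Option Char) (i : Nat) (sp ss : List Nat)
      (sq pa : List (Nat × Nat)),
      m2go '[' ']' rest prev i ss [] = some sq →
      m2go '(' ')' rest prev i sp [] = some pa →
      (∀ x, x ∈ (bscan rest prev i sp ss [] []).1 ↔ x ∈ sq ∨ x ∈ pa) ∧
      (bscan rest prev i sp ss [] []).2 = pipesOf rest i := by
  intro rest
  induction rest with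
  | nil =>
    intro prev i sp ss sq pa hsq hpa
    simp only [m2go] at hsq hpa
    split at hsq
    · split at hpa
      · cases hsq; cases hpa
        simp [bscan, pipesOf]
      · exact absurd hpa (by simp)
    · exact absurd hsq (by simp)
  | cons ch rest' ih =>
    intro prev i sp ss sq pa hsq hpa
    simp only [m2go] at hsq hpa
    simp only [bscan, pipesOf]
    by_cases c1 : ch = '(' ∧ ¬ (prev = some '\\')
    · rw [if_pos c1]
      rw [if_neg (by rintro ⟨h, -⟩; rw [c1.1] at h; exact absurd h (by decide)),
          if_neg (by rintro ⟨h, -⟩; rw [c1.1] at h; exact absurd h (by decide))] at hsq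
      rw [if_pos (⟨c1.1, c1.2⟩ : ch = '(' ∧ prev ≠ some '\\')] at hpa
      rw [if_neg (by rw [c1.1]; decide)]
      exact ih _ _ _ _ _ _ hsq hpa
    · rw [if_neg c1]
      by_cases c2 : ch = ')' ∧ ¬ (prev = some '\\')
      · rw [if_pos c2]
        rw [if_neg (by rintro ⟨h, -⟩; rw [c2.1] at h; exact absurd h (by decide)),
            if_neg (by rintro ⟨h, -⟩; rw [c2.1] at h; exact absurd h (by decide))] at hsq
        rw [if_neg (by rintro ⟨h, -⟩; rw [c2.1] at h; exact absurd h (by decide)),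
            if_pos (⟨c2.1, c2.2⟩ : ch = ')' ∧ prev ≠ some '\\')] at hpa
        cases sp with
        | nil => exact absurd hpa (by simp)
        | cons a st =>
          dsimp only at hpa ⊢
          rw [m2go_acc] at hpa
          rcases Option.map_eq_some_iff.mp hpa with ⟨pa', hpa', rfl⟩
          rw [bscan_acc]
          obtain ⟨hmem, hpipes⟩ := ih _ _ _ _ _ _ hsq hpa'
          constructor
          · intro x
            rw [List.mem_append]
            rw [hmem x]
            simp
            tauto
          · simp [hpipes]
            rw [c2.1]; decide
      · rw [if_neg c2]
        by_cases c3 : ch = '[' ∧ ¬ (prev = some '\\')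
        · rw [if_pos c3]
          rw [if_pos (⟨c3.1, c3.2⟩ : ch = '[' ∧ prev ≠ some '\\')] at hsq
          rw [if_neg (by rintro ⟨h, -⟩; rw [c3.1] at h; exact absurd h (by decide)),
              if_neg (by rintro ⟨h, -⟩; rw [c3.1] at h; exact absurd h (by decide))] at hpa
          rw [if_neg (by rw [c3.1]; decide)]
          exact ih _ _ _ _ _ _ hsq hpa
        · rw [if_neg c3]
          by_cases c4 : ch = ']' ∧ ¬ (prev = some '\\')
          · rw [if_pos c4]
            rw [if_neg (by rintro ⟨h, -⟩; rw [c4.1] at h; exact absurd h (by decide)),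
                if_pos (⟨c4.1, c4.2⟩ : ch = ']' ∧ prev ≠ some '\\')] at hsq
            rw [if_neg (by rintro ⟨h, -⟩; rw [c4.1] at h; exact absurd h (by decide)),
                if_neg (by rintro ⟨h, -⟩; rw [c4.1] at h; exact absurd h (by decide))] at hpa
            cases ss with
            | nil => exact absurd hsq (by simp)
            | cons a st =>
              dsimp only at hsq ⊢
              rw [m2go_acc] at hsq
              rcases Option.map_eq_some_iff.mp hsq with ⟨sq', hsq', rfl⟩
              rw [bscan_acc]
              obtain ⟨hmem, hpipes⟩ := ih _ _ _ _ _ _ hsq' hpa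
              constructor
              · intro x
                rw [List.mem_append]
                rw [hmem x]
                simp
                tauto
              · simp [hpipes]
                rw [c4.1]; decide
          · rw [if_neg c4]
            have hsq' : m2go '[' ']' rest' (some ch) (i+1) ss [] = some sq := by
              rw [if_neg (fun h => c3 ⟨h.1, h.2⟩), if_neg (fun h => c4 ⟨h.1, h.2⟩)] at hsq
              exact hsq
            have hpa' : m2go '(' ')' rest' (some ch) (i+1) sp [] = some pa := by
              rw [if_neg (fun h => c1 ⟨h.1, h.2⟩), if_neg (fun h => c2 ⟨h.1, h.2⟩)] at hpa
              exact hpa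
            by_cases c5 : ch = '|'
            · rw [if_pos c5, if_pos c5]
              rw [bscan_acc]
              obtain ⟨hmem, hpipes⟩ := ih _ _ _ _ _ _ hsq' hpa'
              exact ⟨by simpa using hmem, by simp [hpipes]⟩
            · rw [if_neg c5, if_neg c5]
              exact ih _ _ _ _ _ _ hsq' hpa'


theorem crossSum_zero (bs : List (Nat × Nat))
    (h : ∀ p1 ∈ bs, ∀ p2 ∈ bs, ¬ (p1.1 < p2.1 ∧ p2.1 < p1.2 ∧ p1.2 < p2.2)) :
    crossSum bs = 0 := by
  apply List.sum_eq_zero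
  intro x hx
  rcases List.mem_flatMap.mp hx with ⟨p1, hp1, hx⟩
  rcases List.mem_map.mp hx with ⟨p2, hp2, rfl⟩
  rw [if_neg (h p1 hp1 p2 hp2)]

theorem crossWitness_spec (s : List Char) :
    crossWitness s = true ↔
      ∃ i < s.length, ∃ j < s.length, ∃ k < s.length, ∃ l < s.length,
        i < j ∧ j < k ∧ k < l ∧
        ((PairU s '(' ')' i k ∧ PairU s '[' ']' j l) ∨
         (PairU s '[' ']' i k ∧ PairU s '(' ')' j l)) := by
  simp [crossWitness, List.any_eq_true, List.mem_range, and_assoc]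

theorem main_equal (regex : String) (hpre : Pre_get_split_indices_for_or_operation regex) :
    get_split_indices_for_or_operation regex = get_split_indices_for_or_operation_alt regex := by
  obtain ⟨hbalS, hbalP, hncB⟩ := hpre
  have hnc : ¬ ∃ i < regex.toList.length, ∃ j < regex.toList.length,
      ∃ k < regex.toList.length, ∃ l < regex.toList.length,
      i < j ∧ j < k ∧ k < l ∧
      ((PairU regex.toList '(' ')' i k ∧ PairU regex.toList '[' ']' j l) ∨
       (PairU regex.toList '[' ']' i k ∧ PairU regex.toList '(' ')' j l)) := by
    rw [← crossWitness_spec, hncB]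
    simp
  set s := regex.toList with hs
  obtain ⟨sq, hsq, hsqP⟩ :=
    scan_ok s '[' ']' (by decide) hbalS s 0 [] [] 0 (by simp) (by simp)
      (by simp [StkOk]) (by simp [depU, cntU_zero]) (by simp)
  obtain ⟨pa, hpa, hpaP⟩ :=
    scan_ok s '(' ')' (by decide) hbalP s 0 [] [] 0 (by simp) (by simp)
      (by simp [StkOk]) (by simp [depU, cntU_zero]) (by simp)
  rw [show prevOf s 0 = none from rfl] at hsq hpa
  -- every bracket pair in sq++pa is depth-characterized
  have hsound : ∀ p ∈ sq ++ pa,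
      PairU s '[' ']' p.1 p.2 ∧ p ∈ sq ∨ PairU s '(' ')' p.1 p.2 ∧ p ∈ pa := by
    intro p hp
    rcases List.mem_append.mp hp with h | h
    · exact Or.inl ⟨hsqP p h, h⟩
    · exact Or.inr ⟨hpaP p h, h⟩
  have hlt : ∀ (o c : Char) (p : Nat × Nat), PairU s o c p.1 p.2 → p.2 < s.length :=
    fun o c p hp => hp.2.1.1
  -- the sorted bracket list
  have hmemB : ∀ x, x ∈ PySem.List.sorted (sq ++ pa) (fun x => x.1) ↔ x ∈ sq ++ pa :=
    fun x => PySem.List.mem_sorted _ _ _ x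
  -- no two pairs intersect, so A's validation sum is zero
  have hcross : crossSum (PySem.List.sorted (sq ++ pa) (fun x => x.1)) = 0 := by
    apply crossSum_zero
    intro p1 hp1 p2 hp2 hxx
    rcases hsound p1 ((hmemB p1).mp hp1) with ⟨h1, -⟩ | ⟨h1, -⟩ <;>
      rcases hsound p2 ((hmemB p2).mp hp2) with ⟨h2, -⟩ | ⟨h2, -⟩
    · exact pairU_no_cross s '[' ']' p1.1 p1.2 p2.1 p2.2 h1 h2 ⟨hxx.1, hxx.2.1, hxx.2.2⟩
    · exact hnc ⟨p1.1, by have := hlt _ _ p2 h2; omega, p2.1, by have := hlt _ _ p2 h2; omega, p1.2,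
        by have := hlt _ _ p2 h2; omega, p2.2, hlt _ _ p2 h2,
        hxx.1, hxx.2.1, hxx.2.2, Or.inr ⟨h1, h2⟩⟩
    · exact hnc ⟨p1.1, by have := hlt _ _ p2 h2; omega, p2.1, by have := hlt _ _ p2 h2; omega, p1.2,
        by have := hlt _ _ p2 h2; omega, p2.2, hlt _ _ p2 h2,
        hxx.1, hxx.2.1, hxx.2.2, Or.inl ⟨h1, h2⟩⟩
    · exact pairU_no_cross s '(' ')' p1.1 p1.2 p2.1 p2.2 h1 h2 ⟨hxx.1, hxx.2.1, hxx.2.2⟩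
  -- B's combined pass against A's two passes
  obtain ⟨hmemP, hpipes⟩ := bscan_corr s none 0 [] [] sq pa hsq hpa
  -- assemble
  unfold get_split_indices_for_or_operation get_split_indices_for_or_operation_alt
  rw [← hs]
  dsimp only
  rw [hsq, hpa]
  dsimp only
  rw [if_neg (by simp [hcross])]
  rw [hpipes]
  have hfeq : List.filter
      (fun i => !outerHit (grouping (PySem.List.sorted (sq ++ pa) fun x => x.1)) i)
      (pipesOf s 0) =
    List.filter
      (fun i => !(bscan s none 0 [] [] [] []).1.any fun p => decide (p.1 < i ∧ i < p.2))
      (pipesOf s 0) := by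
   apply List.filter_congr
   intro i _
   have : outerHit (grouping (PySem.List.sorted (sq ++ pa) (fun x => x.1))) i =
      (bscan s none 0 [] [] [] []).1.any (fun p => decide (p.1 < i ∧ i < p.2)) := by
    rw [Bool.eq_iff_iff]
    rw [grouping_contains, List.any_eq_true]
    constructor
    · rintro ⟨p, hp, hpi⟩
      exact ⟨p, (hmemP p).mpr (List.mem_append.mp ((hmemB p).mp hp)),
        decide_eq_true hpi⟩
    · rintro ⟨p, hp, hpi⟩
      exact ⟨p, (hmemB p).mpr (List.mem_append.mpr ((hmemP p).mp hp)),
        of_decide_eq_true hpi⟩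
   rw [this]
  rw [hfeq]


theorem pre_witness_holds :
    Dom_get_split_indices_for_or_operation pvWitness_get_split_indices_for_or_operation ∧
    Pre_get_split_indices_for_or_operation pvWitness_get_split_indices_for_or_operation := by
  constructor <;> decide

-- ===== VERDICT (by name: the statement is the Claim_ definition above) =====
theorem get_split_indices_for_or_operation_spec : Claim_equal_get_split_indices_for_or_operation := by
  intro regex _ hpre
  unfold Spec_get_split_indices_for_or_operation
  exact main_equal regex hpre
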